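-- pv_equiv track=rewrite | github.com/manwar/perlweeklychallenge-club | challenge-277/lubos-kolouch/python/ch-2.py | strong_pairs
-- ===== SOURCE A (Python) =====
-- from collections.abc import Sequence
--
-- def strong_pairs(ints: Sequence[int]) -> int:
--     """Count strong pairs among distinct values.
--
--     A pair (x, y) is strong if 0 < abs(x - y) < min(x, y).
--     Pairs are unordered and duplicates in the input do not create extra pairs.
--     """
--     vals = sorted(set(ints))
--     count = 0
--     for i, x in enumerate(vals):
--         for y in vals[i + 1 :]:
--             diff = y - x
--             if 0 < diff < min(x, y):
--                 count += 1
--     return count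
-- ===== SOURCE B (Python) =====
-- from bisect import bisect_left
--
-- def strong_pairs(ints):
--     """Count strong pairs among distinct values: sort the distinct values once,
--     then for each positive x count the y above it with y < 2*x by binary search."""
--     vals = sorted(set(ints))
--     total = 0
--     for i, x in enumerate(vals):
--         if x > 0:
--             total += bisect_left(vals, 2 * x) - i - 1
--     return total
-- ===== Notes on version B (the rewrite author's own statement) =====
-- stated objective: faster
-- what changed: Replaces the quadratic scan of all pairs of distinct values by sorting the distinct values once and, for each positive x, counting the y with x < y < 2x via one bisect_left binary search.
import Mathlib
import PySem

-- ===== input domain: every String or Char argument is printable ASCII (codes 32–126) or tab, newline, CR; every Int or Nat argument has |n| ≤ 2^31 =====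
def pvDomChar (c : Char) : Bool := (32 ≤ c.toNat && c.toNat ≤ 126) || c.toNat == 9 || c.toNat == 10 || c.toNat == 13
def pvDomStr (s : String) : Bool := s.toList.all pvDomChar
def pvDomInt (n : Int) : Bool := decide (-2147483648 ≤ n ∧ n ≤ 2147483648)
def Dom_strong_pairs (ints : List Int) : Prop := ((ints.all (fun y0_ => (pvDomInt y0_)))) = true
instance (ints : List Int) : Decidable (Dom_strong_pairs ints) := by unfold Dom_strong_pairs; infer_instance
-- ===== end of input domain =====

-- B replaces A's quadratic scan over all pairs of distinct values by one bisect_left binary search per positive value on the sorted distinct values (faster).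

-- ===== PORT A =====
def strong_pairs (ints : List Int) : Int :=
  let vals := PySem.List.sorted (PySem.Set.ofList ints) (fun v => v)
  (PySem.List.enumerate vals).foldl
    (fun count ix =>
      (PySem.List.slice vals (some (ix.1 + 1)) none).foldl
        (fun count y =>
          let diff := y - ix.2
          if 0 < diff ∧ diff < min ix.2 y then count + 1 else count)
        count)
    0

-- ===== PORT B =====
def strong_pairs_alt (ints : List Int) : Int :=
  let vals := PySem.List.sorted (PySem.Set.ofList ints) (fun v => v)
  (PySem.List.enumerate vals).foldl
    (fun total ix =>
      if ix.2 > 0 then total + (PySem.List.bisectLeft vals (2 * ix.2) : Int) - ix.1 - 1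
      else total)
    0

-- ===== PRECONDITION & SPEC =====
def Spec_strong_pairs (ints : List Int) (out : Int) : Prop := out = strong_pairs_alt ints
instance (ints : List Int) (out : Int) : Decidable (Spec_strong_pairs ints out) := by unfold Spec_strong_pairs; infer_instance

-- ===== CLAIM (what is proved, stated in full; the proofs are below) =====
def Claim_equal_strong_pairs : Prop := ∀ (ints : List Int), Dom_strong_pairs ints → Spec_strong_pairs ints (strong_pairs ints)

-- ===== LEMMAS AND PROOFS =====

-- a fold that adds 1 whenever a predicate holds is countP
theorem pv_foldl_count (l : List Int) (p : Int → Prop) [DecidablePred p] (c : Int) :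
    l.foldl (fun c y => if p y then c + 1 else c) c = c + (l.countP (fun y => decide (p y)) : Int) := by
  induction l generalizing c with
  | nil => simp
  | cons a t ih => by_cases h : p a <;> simp [h, ih] <;> ring

-- on a sorted list, bisectLeft t counts the elements below t
theorem pv_bisect_eq_countP (vals : List Int) (t : Int)
    (hs : vals.Pairwise (· ≤ ·)) :
    vals.countP (fun y => decide (y < t)) = PySem.List.bisectLeft vals t := by
  obtain ⟨hle, hlt, hge⟩ := PySem.List.bisectLeft_spec vals t hs
  set b := PySem.List.bisectLeft vals t with hb
  have hsplit := List.take_append_drop b vals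
  have h1 : (vals.take b).countP (fun y => decide (y < t)) = b := by
    have hlen : (vals.take b).length = b := by simp [List.length_take]; omega
    have : (vals.take b).countP (fun y => decide (y < t)) = (vals.take b).length := by
      rw [List.countP_eq_length]
      intro a ha
      obtain ⟨j, hj, rfl⟩ := List.mem_iff_getElem.1 ha
      have hjb : j < b := hlen ▸ hj
      rw [List.getElem_take]
      exact decide_eq_true (hlt j (by omega) hjb)
    omega
  have h2 : (vals.drop b).countP (fun y => decide (y < t)) = 0 := by
    rw [List.countP_eq_zero]
    intro a ha
    obtain ⟨j, hj, rfl⟩ := List.mem_iff_getElem.1 ha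
    rw [List.getElem_drop]
    simp only [decide_eq_true_eq]
    have := hge (b + j) (by simp at hj ⊢; omega) (by omega)
    omega
  calc vals.countP (fun y => decide (y < t))
      = (vals.take b ++ vals.drop b).countP (fun y => decide (y < t)) := by rw [hsplit]
    _ = b := by rw [List.countP_append, h1, h2]; omega

-- A's inner loop over the tail equals B's bisect term, on a strictly increasing list
theorem pv_inner (vals : List Int) (hs : vals.Pairwise (· < ·)) (k : Nat) (hk : k < vals.length) (c : Int) :
    (vals.drop (k+1)).foldl
      (fun c y => if 0 < y - vals[k] ∧ y - vals[k] < min vals[k] y then c + 1 else c) c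
    = if vals[k] > 0 then c + (PySem.List.bisectLeft vals (2 * vals[k]) : Int) - k - 1 else c := by
  have hpg := List.pairwise_iff_getElem.1 hs
  set x := vals[k] with hx
  rw [pv_foldl_count]
  have hmemgt : ∀ y ∈ vals.drop (k+1), x < y := by
    intro y hy
    obtain ⟨j, hj, rfl⟩ := List.mem_iff_getElem.1 hy
    rw [List.getElem_drop]
    exact hpg k (k+1+j) hk (by simp at hj ⊢; omega) (by omega)
  have hcongr : (vals.drop (k+1)).countP (fun y => decide (0 < y - x ∧ y - x < min x y))
      = (vals.drop (k+1)).countP (fun y => decide (y < 2 * x)) := by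
    apply List.countP_congr
    intro y hy
    have := hmemgt y hy
    simp only [decide_eq_true_eq]
    constructor
    · rintro ⟨h1, h2⟩; omega
    · intro h; refine ⟨by omega, by omega⟩
  rw [hcongr]
  by_cases hxpos : x > 0
  · have hsplit : vals.countP (fun y => decide (y < 2 * x)) =
        (vals.take (k+1)).countP (fun y => decide (y < 2 * x)) + (vals.drop (k+1)).countP (fun y => decide (y < 2 * x)) := by
      conv_lhs => rw [← List.take_append_drop (k+1) vals]
      rw [List.countP_append]
    have htake : (vals.take (k+1)).countP (fun y => decide (y < 2 * x)) = k + 1 := by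
      have hlen : (vals.take (k+1)).length = k + 1 := by simp [List.length_take]; omega
      have : (vals.take (k+1)).countP (fun y => decide (y < 2 * x)) = (vals.take (k+1)).length := by
        rw [List.countP_eq_length]
        intro a ha
        obtain ⟨j, hj, rfl⟩ := List.mem_iff_getElem.1 ha
        have hjk : j ≤ k := by rw [hlen] at hj; omega
        rw [List.getElem_take]
        have hle : vals[j] ≤ x := by
          rcases Nat.lt_or_ge j k with h | h
          · exact le_of_lt (hpg j k (by omega) hk h)
          · have : j = k := by omega
            subst this; exact le_refl _
        exact decide_eq_true (by omega)
      omega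
    have hbl := pv_bisect_eq_countP vals (2 * x) (hs.imp le_of_lt)
    rw [if_pos hxpos]
    rw [hsplit, htake] at hbl
    push_cast [← hbl]
    ring
  · have hzero : (vals.drop (k+1)).countP (fun y => decide (y < 2 * x)) = 0 := by
      rw [List.countP_eq_zero]
      intro a ha
      have := hmemgt a ha
      simp only [decide_eq_true_eq]
      omega
    rw [if_neg hxpos, hzero]
    simp

theorem strong_pairs_eq (ints : List Int) : strong_pairs ints = strong_pairs_alt ints := by
  unfold strong_pairs strong_pairs_alt
  set vals := PySem.List.sorted (PySem.Set.ofList ints) (fun v => v) with hv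
  have hs : vals.Pairwise (· < ·) := PySem.List.sorted_ofList_pairwise_lt ints
  apply PySem.List.foldl_congr_mem
  intro acc ix hix
  obtain ⟨k, hk, rfl⟩ := (PySem.List.mem_enumerate_iff vals 0 ix).1 hix
  simp only [zero_add]
  have hslice : PySem.List.slice vals (some ((k : Int) + 1)) none = vals.drop (k+1) := by
    have : ((k : Int) + 1) = ((k + 1 : Nat) : Int) := by push_cast; ring
    rw [this, PySem.List.slice_from_natCast]
  rw [hslice]
  have := pv_inner vals hs k hk acc
  simpa using this

-- ===== VERDICT (by name: the statement is the Claim_ definition above) =====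
theorem strong_pairs_spec : Claim_equal_strong_pairs := by
  intro ints _
  unfold Spec_strong_pairs
  exact strong_pairs_eq ints
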